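-- pv_equiv track=rewrite | github.com/mae04038/Algorithm_HJ | AlgoShare/week2/최고의집합.py | solution
-- ===== SOURCE A (Python) =====
-- def solution(n, s):
--     answer = []
--     # 원소의 합이 s이면서 곱이 가장 크도록 - n 경우의수로 적어서 풀어보기
--     if s//n == 0:
--         return [-1]
--     while n >= 1:
--         answer.append(s//n)
--         s -= s//n
--         n -= 1
--
--     return answer
-- ===== SOURCE B (Python) =====
-- def solution(n, s):
--     if s // n == 0:
--         return [-1]
--     q, r = divmod(s, n)
--     return [q + (i >= n - r) for i in range(n)]
-- ===== Notes on version B (the rewrite author's own statement) =====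
-- stated objective: simpler
-- what changed: B replaces A's while-loop of repeated floor divisions with running subtraction by a single divmod plus direct construction of the balanced partition via index arithmetic over range(n).
import Mathlib
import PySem

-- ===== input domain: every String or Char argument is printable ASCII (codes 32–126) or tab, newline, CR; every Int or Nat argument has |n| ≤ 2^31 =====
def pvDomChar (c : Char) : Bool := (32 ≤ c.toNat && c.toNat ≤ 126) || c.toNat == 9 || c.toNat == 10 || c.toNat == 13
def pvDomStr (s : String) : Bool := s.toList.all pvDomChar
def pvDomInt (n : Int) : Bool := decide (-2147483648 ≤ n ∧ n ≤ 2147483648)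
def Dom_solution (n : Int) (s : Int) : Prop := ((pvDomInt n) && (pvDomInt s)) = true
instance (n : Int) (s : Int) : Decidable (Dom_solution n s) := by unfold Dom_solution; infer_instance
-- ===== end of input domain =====

-- B builds the same balanced partition from one divmod instead of A's loop of repeated floor divisions.

-- ===== PORT A =====
-- while n >= 1: answer.append(s//n); s -= s//n; n -= 1
def solutionLoopA (n : Int) (s : Int) : List Int :=
  if _h : 1 ≤ n then
    PySem.Int.floordiv s n :: solutionLoopA (n - 1) (s - PySem.Int.floordiv s n)
  else []
termination_by n.toNat
decreasing_by omega

def solution (n : Int) (s : Int) : List Int :=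
  if PySem.Int.floordiv s n = 0 then [-1]
  else solutionLoopA n s

-- ===== PORT B =====
def solution_alt (n : Int) (s : Int) : List Int :=
  if PySem.Int.floordiv s n = 0 then [-1]
  else
    let q := PySem.Int.floordiv s n
    let r := PySem.Int.mod s n
    (PySem.List.pyRange 0 n 1).map (fun i => q + (if n - r ≤ i then 1 else 0))

-- ===== PRECONDITION & SPEC =====
-- Pre_ excludes exactly n = 0, where the Python A raises ZeroDivisionError on s//n.
def Pre_solution (n : Int) (s : Int) : Prop := n ≠ 0
instance (n : Int) (s : Int) : Decidable (Pre_solution n s) := by unfold Pre_solution; infer_instance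
def pvWitness_solution : Int × Int := (3, 8)

def Spec_solution (n : Int) (s : Int) (out : List Int) : Prop := out = solution_alt n s
instance (n : Int) (s : Int) (out : List Int) : Decidable (Spec_solution n s out) := by unfold Spec_solution; infer_instance

-- ===== CLAIM (what is proved, stated in full; the proofs are below) =====
def Claim_equal_solution : Prop := ∀ (n : Int) (s : Int), Dom_solution n s → Pre_solution n s → Spec_solution n s (solution n s)

-- ===== LEMMAS AND PROOFS =====

-- A's loop, started at n = ↑m, produces the balanced partition that B writes down directly.
lemma loopA_eq (m : Nat) : ∀ s : Int,
    solutionLoopA (m : Int) s =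
      (PySem.List.pyRange 0 (m : Int) 1).map
        (fun i => PySem.Int.floordiv s (m : Int) +
          (if (m : Int) - PySem.Int.mod s (m : Int) ≤ i then 1 else 0)) := by
  induction m with
  | zero =>
    intro s
    rw [solutionLoopA, PySem.List.pyRange_one_eq_nil (by norm_num)]
    simp
  | succ m ih =>
    intro s
    have hN' : ((m + 1 : Nat) : Int) = (m : Int) + 1 := by push_cast; ring
    rw [hN']
    set q : Int := PySem.Int.floordiv s ((m : Int) + 1) with hq
    set r : Int := PySem.Int.mod s ((m : Int) + 1) with hr
    have hqe : q = s / ((m : Int) + 1) := by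
      rw [hq, PySem.Int.floordiv_eq_ediv_of_pos (by positivity)]
    have hre : r = s % ((m : Int) + 1) := by
      rw [hr, PySem.Int.mod_eq_emod_of_pos (by positivity)]
    have hr0 : 0 ≤ r := by rw [hre]; exact Int.emod_nonneg s (by positivity)
    have hrN : r < (m : Int) + 1 := by
      rw [hre]; exact Int.emod_lt_of_pos s (by positivity)
    have hs : s = ((m : Int) + 1) * q + r := by
      rw [hqe, hre]; rw [Int.mul_ediv_add_emod s ((m : Int) + 1)]
    -- unfold one loop step
    rw [solutionLoopA, dif_pos (show (1 : Int) ≤ (m : Int) + 1 by omega)]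
    have hstep : (m : Int) + 1 - 1 = (m : Int) := by ring
    rw [hstep, ih (s - q)]
    -- peel the head off B's range on the right
    conv_rhs => rw [PySem.List.pyRange_one_cons (show (0 : Int) < (m : Int) + 1 by positivity)]
    rw [List.map_cons]
    congr 1
    · -- head element is q
      have h0 : ¬ ((m : Int) + 1 - r ≤ (0 : Int)) := by omega
      simp [h0, ← hqe]
    · -- tails agree pointwise over List.range m
      rw [PySem.List.pyRange_one 0 (m : Int), PySem.List.pyRange_one (0 + 1) ((m : Int) + 1)]
      have hlen : ((m : Int) - 0).toNat = m := by omega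
      have hlen' : ((m : Int) + 1 - (0 + 1)).toNat = m := by omega
      rw [hlen, hlen', List.map_map, List.map_map]
      apply List.map_congr_left
      intro k hk
      have hkm : (k : Int) < (m : Int) := by exact_mod_cast List.mem_range.mp hk
      by_cases hrm : r = (m : Int)
      · -- r = m : remaining sum is m*(q+1)
        have hsq : s - q = ((m : Int)) * (q + 1) := by rw [hs, hrm]; ring
        have hdiv : PySem.Int.floordiv (s - q) (m : Int) = q + 1 := by
          rw [PySem.Int.floordiv_eq_ediv_of_pos (by omega), hsq,
              Int.mul_ediv_cancel_left _ (by omega)]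
        have hmod : PySem.Int.mod (s - q) (m : Int) = 0 := by
          rw [PySem.Int.mod_eq_emod_of_pos (by omega), hsq, Int.mul_emod_right]
        simp only [Function.comp, hdiv, hmod]
        split_ifs <;> omega
      · -- r < m : remaining sum is m*q + r
        have hrm' : r < (m : Int) := by omega
        have hm0 : (m : Int) ≠ 0 := by omega
        have hsq : s - q = r + q * (m : Int) := by rw [hs]; ring
        have hdiv : PySem.Int.floordiv (s - q) (m : Int) = q := by
          rw [PySem.Int.floordiv_eq_ediv_of_pos (by omega), hsq,
              Int.add_mul_ediv_right _ _ hm0,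
              Int.ediv_eq_zero_of_lt hr0 hrm', zero_add]
        have hmod : PySem.Int.mod (s - q) (m : Int) = r := by
          rw [PySem.Int.mod_eq_emod_of_pos (by omega), hsq,
              Int.add_mul_emod_self_right _ _ _, Int.emod_eq_of_lt hr0 hrm']
        simp only [Function.comp, hdiv, hmod]
        split_ifs <;> omega

-- ===== VERDICT (by name: the statement is the Claim_ definition above) =====
theorem solution_spec : Claim_equal_solution := by
  intro n s _ hpre
  unfold Spec_solution solution solution_alt
  by_cases hg : PySem.Int.floordiv s n = 0
  · simp [hg]
  · simp only [hg]
    by_cases hn : 1 ≤ n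
    · have hcast : n = ((n.toNat : Nat) : Int) := (Int.toNat_of_nonneg (by omega)).symm
      rw [hcast]
      exact loopA_eq n.toNat s
    · -- n < 0 (n ≠ 0): loop never runs, range is empty
      rw [solutionLoopA, dif_neg hn, PySem.List.pyRange_one_eq_nil (by omega)]
      simp
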